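-- pv_equiv track=rewrite | github.com/EvilBoom/Qt_Oil_New | Controller/KnowledgeGraphController.py | _generate_lift_method_layout
-- ===== SOURCE A (Python) =====
-- from typing import Dict, Any, List, Optional
--
-- def _generate_lift_method_layout(nodes: List[Dict]) -> Dict:
--     """生成举升方式图谱布局"""
--     layout = {}
--     center_x, center_y = 400, 300
--
--     # 中心决策节点
--     layout['lift_decision'] = {'x': center_x, 'y': center_y}
--
--     # 输入参数 - 左侧
--     input_positions = [
--         {'x': center_x - 200, 'y': center_y - 80},
--         {'x': center_x - 200, 'y': center_y - 20},
--         {'x': center_x - 200, 'y': center_y + 40},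
--         {'x': center_x - 200, 'y': center_y + 100}
--     ]
--
--     input_nodes = [n for n in nodes if n['type'] == 'input']
--     for i, node in enumerate(input_nodes):
--         if i < len(input_positions):
--             layout[node['id']] = input_positions[i]
--
--     # 举升方式选项 - 右侧
--     method_positions = [
--         {'x': center_x + 200, 'y': center_y - 60},
--         {'x': center_x + 200, 'y': center_y},
--         {'x': center_x + 200, 'y': center_y + 60}
--     ]
--
--     method_nodes = [n for n in nodes if n['type'] == 'lift_option']
--     for i, node in enumerate(method_nodes):
--         if i < len(method_positions):
--             layout[node['id']] = method_positions[i]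
--
--     # 决策规则 - 下方
--     rule_nodes = [n for n in nodes if n['type'] == 'rule']
--     for i, node in enumerate(rule_nodes):
--         layout[node['id']] = {'x': center_x - 50 + i * 100, 'y': center_y + 150}
--
--     return layout
-- ===== SOURCE B (Python) =====
-- from typing import Dict, List
--
--
-- def _generate_lift_method_layout(nodes: List[Dict]) -> Dict:
--     """Single classifying pass with per-type counters and closed-form coordinates,
--     then merge the staged entries into the layout in fixed type order."""
--     cx, cy = 400, 300
--     inp, met, rul = [], [], []
--     ci = cm = cr = 0
--     for node in nodes:
--         t = node['type']
--         if t == 'input':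
--             if ci < 4:
--                 inp.append((node['id'], {'x': cx - 200, 'y': cy - 80 + 60 * ci}))
--             ci += 1
--         elif t == 'lift_option':
--             if cm < 3:
--                 met.append((node['id'], {'x': cx + 200, 'y': cy - 60 + 60 * cm}))
--             cm += 1
--         elif t == 'rule':
--             rul.append((node['id'], {'x': cx - 50 + 100 * cr, 'y': cy + 150}))
--             cr += 1
--     layout = {'lift_decision': {'x': cx, 'y': cy}}
--     for nid, pos in inp + met + rul:
--         layout[nid] = pos
--     return layout
-- ===== Notes on version B (the rewrite author's own statement) =====
-- stated objective: alternative
-- what changed: Replaces A's three filter-then-enumerate passes and hard-coded position tables by one classifying pass over the nodes with per-type counters and closed-form coordinate arithmetic, staging entries per type and merging them into the layout in the fixed order input, lift_option, rule.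
import Mathlib
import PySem

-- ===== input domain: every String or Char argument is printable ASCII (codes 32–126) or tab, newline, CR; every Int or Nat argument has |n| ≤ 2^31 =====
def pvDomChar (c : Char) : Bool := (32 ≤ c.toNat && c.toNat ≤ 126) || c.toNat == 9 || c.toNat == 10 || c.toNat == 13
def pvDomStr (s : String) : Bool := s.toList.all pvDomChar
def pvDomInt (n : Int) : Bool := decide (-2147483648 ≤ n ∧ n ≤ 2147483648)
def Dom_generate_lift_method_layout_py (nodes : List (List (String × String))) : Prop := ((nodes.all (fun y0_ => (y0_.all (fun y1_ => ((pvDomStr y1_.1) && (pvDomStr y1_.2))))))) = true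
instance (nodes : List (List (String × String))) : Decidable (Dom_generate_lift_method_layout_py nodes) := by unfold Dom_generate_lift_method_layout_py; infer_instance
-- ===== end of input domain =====

-- B replaces A's three filter-then-enumerate passes by one classifying pass with per-type
-- counters and closed-form coordinates, merging staged entries in fixed type order (alternative
-- decomposition, same cost). Equivalence of the RETURN value on all inputs where A returns.

-- ===== PORT A =====
-- node['k'] lookup (first match, as a Python dict has unique keys); total here, Pre_ excludes missing keys
def pvGet (n : List (String × String)) (k : String) : String :=
  ((PySem.Dict.mk n).get? k).getD ""

def generate_lift_method_layout_py (nodes : List (List (String × String))) : List (String × List (String × Int)) :=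
  let layout : PySem.Dict String (List (String × Int)) :=
    PySem.Dict.empty.insert "lift_decision" [("x", 400), ("y", 300)]
  let input_positions : List (List (String × Int)) :=
    [[("x", 400 - 200), ("y", 300 - 80)], [("x", 400 - 200), ("y", 300 - 20)],
     [("x", 400 - 200), ("y", 300 + 40)], [("x", 400 - 200), ("y", 300 + 100)]]
  let input_nodes := nodes.filter (fun n => pvGet n "type" == "input")
  let layout := (PySem.List.enumerate input_nodes).foldl
    (fun L p => if p.1 < 4 then L.insert (pvGet p.2 "id") (PySem.List.pyGetD input_positions p.1 []) else L) layout
  let method_positions : List (List (String × Int)) :=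
    [[("x", 400 + 200), ("y", 300 - 60)], [("x", 400 + 200), ("y", 300)], [("x", 400 + 200), ("y", 300 + 60)]]
  let method_nodes := nodes.filter (fun n => pvGet n "type" == "lift_option")
  let layout := (PySem.List.enumerate method_nodes).foldl
    (fun L p => if p.1 < 3 then L.insert (pvGet p.2 "id") (PySem.List.pyGetD method_positions p.1 []) else L) layout
  let rule_nodes := nodes.filter (fun n => pvGet n "type" == "rule")
  let layout := (PySem.List.enumerate rule_nodes).foldl
    (fun L p => L.insert (pvGet p.2 "id") [("x", 400 - 50 + p.1 * 100), ("y", 300 + 150)]) layout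
  layout.items

-- ===== PORT B =====
-- one classifying step: state = (staged input entries, input count, staged method entries, method count, staged rule entries, rule count)
def pvBStep
    (st : List (String × List (String × Int)) × Int × List (String × List (String × Int)) × Int ×
          List (String × List (String × Int)) × Int)
    (node : List (String × String)) :
    List (String × List (String × Int)) × Int × List (String × List (String × Int)) × Int ×
    List (String × List (String × Int)) × Int :=
  match st with
  | (inp, ci, met, cm, rul, cr) =>
    let t := pvGet node "type"
    if t == "input" then
      ((if ci < 4 then inp ++ [(pvGet node "id", [("x", 400 - 200), ("y", 300 - 80 + 60 * ci)])] else inp),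
       ci + 1, met, cm, rul, cr)
    else if t == "lift_option" then
      (inp, ci,
       (if cm < 3 then met ++ [(pvGet node "id", [("x", 400 + 200), ("y", 300 - 60 + 60 * cm)])] else met),
       cm + 1, rul, cr)
    else if t == "rule" then
      (inp, ci, met, cm, rul ++ [(pvGet node "id", [("x", 400 - 50 + 100 * cr), ("y", 300 + 150)])], cr + 1)
    else (inp, ci, met, cm, rul, cr)

def generate_lift_method_layout_py_alt (nodes : List (List (String × String))) : List (String × List (String × Int)) :=
  match nodes.foldl pvBStep ([], 0, [], 0, [], 0) with
  | (inp, _, met, _, rul, _) =>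
    let layout : PySem.Dict String (List (String × Int)) :=
      PySem.Dict.empty.insert "lift_decision" [("x", 400), ("y", 300)]
    ((inp ++ met ++ rul).foldl (fun L e => L.insert e.1 e.2) layout).items

-- ===== PRECONDITION & SPEC =====
-- Pre_ excludes exactly the inputs on which the Python A raises KeyError: a node without 'type',
-- or a node without 'id' that is one of the first 4 'input' nodes, one of the first 3 'lift_option'
-- nodes, or any 'rule' node.
def Pre_generate_lift_method_layout_py (nodes : List (List (String × String))) : Prop :=
  (∀ n ∈ nodes, (PySem.Dict.mk n).contains "type" = true) ∧
  (∀ n ∈ (nodes.filter (fun n => pvGet n "type" == "input")).take 4, (PySem.Dict.mk n).contains "id" = true) ∧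
  (∀ n ∈ (nodes.filter (fun n => pvGet n "type" == "lift_option")).take 3, (PySem.Dict.mk n).contains "id" = true) ∧
  (∀ n ∈ nodes.filter (fun n => pvGet n "type" == "rule"), (PySem.Dict.mk n).contains "id" = true)
instance (nodes : List (List (String × String))) : Decidable (Pre_generate_lift_method_layout_py nodes) := by
  unfold Pre_generate_lift_method_layout_py; infer_instance

def pvWitness_generate_lift_method_layout_py : (List (List (String × String))) :=
  [[("type", "input"), ("id", "a")], [("type", "rule"), ("id", "r")], [("type", "note")]]

def Spec_generate_lift_method_layout_py (nodes : List (List (String × String))) (out : List (String × List (String × Int))) : Prop := out = generate_lift_method_layout_py_alt nodes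
instance (nodes : List (List (String × String))) (out : List (String × List (String × Int))) : Decidable (Spec_generate_lift_method_layout_py nodes out) := by unfold Spec_generate_lift_method_layout_py; infer_instance

-- ===== CLAIM (what is proved, stated in full; the proofs are below) =====
def Claim_equal_generate_lift_method_layout_py : Prop := ∀ (nodes : List (List (String × String))), Dom_generate_lift_method_layout_py nodes → Pre_generate_lift_method_layout_py nodes → Spec_generate_lift_method_layout_py nodes (generate_lift_method_layout_py nodes)

-- ===== LEMMAS AND PROOFS =====

-- canonical per-type entry lists (counter i is the position of the node within its type group)
def pvEntIn : List (List (String × String)) → Int → List (String × List (String × Int))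
  | [], _ => []
  | n :: t, i =>
      (if i < 4 then [(pvGet n "id", [("x", 200), ("y", 220 + 60 * i)])] else []) ++ pvEntIn t (i + 1)

def pvEntMet : List (List (String × String)) → Int → List (String × List (String × Int))
  | [], _ => []
  | n :: t, i =>
      (if i < 3 then [(pvGet n "id", [("x", 600), ("y", 240 + 60 * i)])] else []) ++ pvEntMet t (i + 1)

def pvEntRul : List (List (String × String)) → Int → List (String × List (String × Int))
  | [], _ => []
  | n :: t, i => (pvGet n "id", [("x", 350 + 100 * i), ("y", 450)]) :: pvEntRul t (i + 1)

-- A's input loop is a fold of insert over pvEntIn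
theorem aFoldIn (l : List (List (String × String))) : ∀ (i : Int), 0 ≤ i →
    ∀ (L : PySem.Dict String (List (String × Int))),
    (PySem.List.enumerate l i).foldl
      (fun L p => if p.1 < 4 then L.insert (pvGet p.2 "id")
        (PySem.List.pyGetD [[("x", 400 - 200), ("y", 300 - 80)], [("x", 400 - 200), ("y", 300 - 20)],
          [("x", 400 - 200), ("y", 300 + 40)], [("x", 400 - 200), ("y", 300 + 100)]] p.1 []) else L) L
    = (pvEntIn l i).foldl (fun L e => L.insert e.1 e.2) L := by
  induction l with
  | nil => intro i _ L; simp [PySem.List.enumerate_nil, pvEntIn]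
  | cons n t ih =>
    intro i hi L
    rw [PySem.List.enumerate_cons]
    simp only [List.foldl_cons, pvEntIn]
    by_cases h4 : i < 4
    · have : PySem.List.pyGetD [[("x", 400 - 200), ("y", 300 - 80)], [("x", 400 - 200), ("y", 300 - 20)],
          [("x", 400 - 200), ("y", 300 + 40)], [("x", 400 - 200), ("y", 300 + 100)]] i ([] : List (String × Int))
          = [("x", 200), ("y", 220 + 60 * i)] := by
        interval_cases i <;> decide
      simp only [h4, if_true, this]
      rw [ih (i + 1) (by omega)]
      simp
    · simp only [h4, if_false]
      rw [ih (i + 1) (by omega)]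
      simp

-- A's method loop is a fold of insert over pvEntMet
theorem aFoldMet (l : List (List (String × String))) : ∀ (i : Int), 0 ≤ i →
    ∀ (L : PySem.Dict String (List (String × Int))),
    (PySem.List.enumerate l i).foldl
      (fun L p => if p.1 < 3 then L.insert (pvGet p.2 "id")
        (PySem.List.pyGetD [[("x", 400 + 200), ("y", 300 - 60)], [("x", 400 + 200), ("y", 300)],
          [("x", 400 + 200), ("y", 300 + 60)]] p.1 []) else L) L
    = (pvEntMet l i).foldl (fun L e => L.insert e.1 e.2) L := by
  induction l with
  | nil => intro i _ L; simp [PySem.List.enumerate_nil, pvEntMet]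
  | cons n t ih =>
    intro i hi L
    rw [PySem.List.enumerate_cons]
    simp only [List.foldl_cons, pvEntMet]
    by_cases h3 : i < 3
    · have : PySem.List.pyGetD [[("x", 400 + 200), ("y", 300 - 60)], [("x", 400 + 200), ("y", 300)],
          [("x", 400 + 200), ("y", 300 + 60)]] i ([] : List (String × Int))
          = [("x", 600), ("y", 240 + 60 * i)] := by
        interval_cases i <;> decide
      simp only [h3, if_true, this]
      rw [ih (i + 1) (by omega)]
      simp
    · simp only [h3, if_false]
      rw [ih (i + 1) (by omega)]
      simp

-- A's rule loop is a fold of insert over pvEntRul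
theorem aFoldRul (l : List (List (String × String))) : ∀ (i : Int),
    ∀ (L : PySem.Dict String (List (String × Int))),
    (PySem.List.enumerate l i).foldl
      (fun L p => L.insert (pvGet p.2 "id") [("x", 400 - 50 + p.1 * 100), ("y", 300 + 150)]) L
    = (pvEntRul l i).foldl (fun L e => L.insert e.1 e.2) L := by
  induction l with
  | nil => intro i L; simp [PySem.List.enumerate_nil, pvEntRul]
  | cons n t ih =>
    intro i L
    rw [PySem.List.enumerate_cons]
    simp only [List.foldl_cons, pvEntRul]
    rw [ih (i + 1)]
    have hx : (400 : Int) - 50 + i * 100 = 350 + 100 * i := by ring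
    have hy : (300 : Int) + 150 = 450 := by norm_num
    rw [hx, hy]

-- B's classifying pass computes exactly the three staged entry lists
theorem bPass (l : List (List (String × String))) :
    ∀ (si sm sr : List (String × List (String × Int))) (ci cm cr : Int),
    l.foldl pvBStep (si, ci, sm, cm, sr, cr)
    = (si ++ pvEntIn (l.filter (fun n => pvGet n "type" == "input")) ci,
       ci + ((l.filter (fun n => pvGet n "type" == "input")).length : Int),
       sm ++ pvEntMet (l.filter (fun n => pvGet n "type" == "lift_option")) cm,
       cm + ((l.filter (fun n => pvGet n "type" == "lift_option")).length : Int),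
       sr ++ pvEntRul (l.filter (fun n => pvGet n "type" == "rule")) cr,
       cr + ((l.filter (fun n => pvGet n "type" == "rule")).length : Int)) := by
  induction l with
  | nil => intro si sm sr ci cm cr; simp [pvEntIn, pvEntMet, pvEntRul]
  | cons n t ih =>
    intro si sm sr ci cm cr
    simp only [List.foldl_cons, List.filter_cons]
    by_cases hin : pvGet n "type" = "input"
    · have hm : (pvGet n "type" == "lift_option") = false := by simp [hin]
      have hr : (pvGet n "type" == "rule") = false := by simp [hin]
      simp only [pvBStep, hin, beq_self_eq_true, if_true]
      rw [ih]
      by_cases h4 : ci < 4 <;>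
        simp [h4, pvEntIn, List.append_assoc, List.length_cons] <;> omega
    · by_cases hmet : pvGet n "type" = "lift_option"
      · have hi : (pvGet n "type" == "input") = false := by simp [hmet]
        have hr : (pvGet n "type" == "rule") = false := by simp [hmet]
        simp only [pvBStep, hmet, beq_self_eq_true, if_true]
        rw [ih]
        by_cases h3 : cm < 3 <;>
          simp [h3, pvEntMet, List.append_assoc, List.length_cons] <;> omega
      · by_cases hrul : pvGet n "type" = "rule"
        · have hi : (pvGet n "type" == "input") = false := by simp [hrul]
          have hm : (pvGet n "type" == "lift_option") = false := by simp [hrul]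
          simp only [pvBStep, hrul, beq_self_eq_true, if_true]
          rw [ih]
          simp [pvEntRul, List.length_cons]
          omega
        · have hi : (pvGet n "type" == "input") = false := by simp [hin]
          have hm : (pvGet n "type" == "lift_option") = false := by simp [hmet]
          have hr : (pvGet n "type" == "rule") = false := by simp [hrul]
          simp only [pvBStep, hi, hm, hr, Bool.false_eq_true, if_false]
          rw [ih]

-- ===== VERDICT (by name: the statement is the Claim_ definition above) =====
theorem generate_lift_method_layout_py_spec : Claim_equal_generate_lift_method_layout_py := by
  intro nodes _ _
  unfold Spec_generate_lift_method_layout_py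
  unfold generate_lift_method_layout_py generate_lift_method_layout_py_alt
  rw [bPass]
  simp only
  rw [aFoldIn _ 0 (by norm_num), aFoldMet _ 0 (by norm_num), aFoldRul _ 0]
  simp [List.foldl_append]
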